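-- pv_equiv track=rewrite | github.com/sunnycqcn/quota-alignment | quota_align.py | make_range
-- ===== SOURCE A (Python) =====
-- def make_range(clusters):
--     # convert to interval ends from a list of anchors
--     eclusters = []
--     for cluster in clusters:
--         xlist = [a[0] for a in cluster]
--         ylist = [a[1] for a in cluster]
--         score = sum(a[-1] for a in cluster)
--
--         xchr, xmin = min(xlist)
--         xchr, xmax = max(xlist)
--         ychr, ymin = min(ylist)
--         ychr, ymax = max(ylist)
--
--         eclusters.append(((xchr, xmin, xmax), (ychr, ymin, ymax), score))
--
--     return eclusters
-- ===== SOURCE B (Python) =====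
-- def make_range(clusters):
--     # single pass per cluster: running lexicographic min/max of the x and y
--     # tuples and a running score, instead of building xlist/ylist and
--     # scanning them four times with min/max plus a sum pass
--     eclusters = []
--     for cluster in clusters:
--         first = cluster[0]
--         xlo = xhi = first[0]
--         ylo = yhi = first[1]
--         score = first[-1]
--         for a in cluster[1:]:
--             x, y = a[0], a[1]
--             if x < xlo:
--                 xlo = x
--             elif x > xhi:
--                 xhi = x
--             if y < ylo:
--                 ylo = y
--             elif y > yhi:
--                 yhi = y
--             score += a[-1]
--         eclusters.append(((xhi[0], xlo[1], xhi[1]), (yhi[0], ylo[1], yhi[1]), score))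
--     return eclusters
-- ===== Notes on version B (the rewrite author's own statement) =====
-- stated objective: alternative
-- what changed: Per cluster, the xlist/ylist comprehensions with four separate min/max scans plus a sum generator are replaced by one single pass keeping running lexicographic min/max anchor tuples and a running score, unpacked at the end.
import Mathlib
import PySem

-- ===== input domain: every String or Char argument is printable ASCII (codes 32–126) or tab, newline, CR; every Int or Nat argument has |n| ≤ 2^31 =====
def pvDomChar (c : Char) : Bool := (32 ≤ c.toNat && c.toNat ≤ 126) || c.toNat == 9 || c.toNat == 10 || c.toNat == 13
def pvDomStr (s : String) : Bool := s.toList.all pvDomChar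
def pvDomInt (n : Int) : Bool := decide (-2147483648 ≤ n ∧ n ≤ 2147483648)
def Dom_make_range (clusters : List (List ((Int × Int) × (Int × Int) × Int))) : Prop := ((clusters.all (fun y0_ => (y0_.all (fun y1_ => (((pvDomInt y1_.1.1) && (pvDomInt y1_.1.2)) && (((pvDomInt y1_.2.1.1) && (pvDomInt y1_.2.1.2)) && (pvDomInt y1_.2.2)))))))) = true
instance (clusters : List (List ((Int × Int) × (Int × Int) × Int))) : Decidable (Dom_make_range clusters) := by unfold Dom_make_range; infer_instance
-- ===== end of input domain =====

-- B replaces the per-cluster xlist/ylist comprehensions plus four min/max scans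
-- and a sum pass by one running-min/max/score pass over the cluster's anchors
-- (objective: alternative decomposition, same asymptotic cost).

-- ===== PORT A =====
-- per-cluster body of A; none = min([]) raises ValueError (excluded by Pre_)
def make_range_clusterA (cluster : List ((Int × Int) × (Int × Int) × Int)) :
    Option ((Int × Int × Int) × (Int × Int × Int) × Int) :=
  let xlist := cluster.map (fun a => a.1)
  let ylist := cluster.map (fun a => a.2.1)
  let score := cluster.foldl (fun s a => s + a.2.2) 0
  -- Python's min/max on (Int, Int) tuples compares lexicographically: min2?/max2?
  match PySem.List.min2? xlist (fun p => p.1) (fun p => p.2),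
        PySem.List.max2? xlist (fun p => p.1) (fun p => p.2),
        PySem.List.min2? ylist (fun p => p.1) (fun p => p.2),
        PySem.List.max2? ylist (fun p => p.1) (fun p => p.2) with
  | some xmn, some xmx, some ymn, some ymx =>
      -- xchr is reassigned by 'xchr, xmax = max(xlist)', so it comes from the max tuple
      some ((xmx.1, xmn.2, xmx.2), (ymx.1, ymn.2, ymx.2), score)
  | _, _, _, _ => none

def make_range (clusters : List (List ((Int × Int) × (Int × Int) × Int))) :
    List ((Int × Int × Int) × (Int × Int × Int) × Int) :=
  clusters.foldl (fun ecl c =>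
    match make_range_clusterA c with
    | some e => ecl ++ [e]
    | none => ecl) []

-- ===== PORT B =====
-- Python's lexicographic '<' on (Int, Int) tuples, exact
def pyLexLt (p q : Int × Int) : Bool := p.1 < q.1 || (p.1 == q.1 && p.2 < q.2)

-- one anchor's update of B's running state (xlo, xhi, ylo, yhi, score)
def make_range_bStep (st : (Int × Int) × (Int × Int) × (Int × Int) × (Int × Int) × Int)
    (a : (Int × Int) × (Int × Int) × Int) :
    (Int × Int) × (Int × Int) × (Int × Int) × (Int × Int) × Int :=
  match st with
  | (xlo, xhi, ylo, yhi, score) =>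
    let x := a.1
    let y := a.2.1
    let xp := if pyLexLt x xlo then (x, xhi) else if pyLexLt xhi x then (xlo, x) else (xlo, xhi)
    let yp := if pyLexLt y ylo then (y, yhi) else if pyLexLt yhi y then (ylo, y) else (ylo, yhi)
    (xp.1, xp.2, yp.1, yp.2, score + a.2.2)

-- per-cluster body of B; none = cluster[0] raises IndexError (excluded by Pre_)
def make_range_clusterB (cluster : List ((Int × Int) × (Int × Int) × Int)) :
    Option ((Int × Int × Int) × (Int × Int × Int) × Int) :=
  match cluster with
  | [] => none
  | first :: rest =>
    match rest.foldl make_range_bStep (first.1, first.1, first.2.1, first.2.1, first.2.2) with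
    | (xlo, xhi, ylo, yhi, score) =>
      some ((xhi.1, xlo.2, xhi.2), (yhi.1, ylo.2, yhi.2), score)

def make_range_alt (clusters : List (List ((Int × Int) × (Int × Int) × Int))) :
    List ((Int × Int × Int) × (Int × Int × Int) × Int) :=
  clusters.foldl (fun ecl c =>
    match make_range_clusterB c with
    | some e => ecl ++ [e]
    | none => ecl) []

-- ===== PRECONDITION & SPEC =====
-- Pre_ excludes clusters containing an empty anchor list: there A raises
-- ValueError (min of an empty sequence) and B raises IndexError (cluster[0]).
def Pre_make_range (clusters : List (List ((Int × Int) × (Int × Int) × Int))) : Prop :=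
  ∀ c ∈ clusters, c ≠ []
instance (clusters : List (List ((Int × Int) × (Int × Int) × Int))) : Decidable (Pre_make_range clusters) := by unfold Pre_make_range; infer_instance
def pvWitness_make_range : (List (List ((Int × Int) × (Int × Int) × Int))) :=
  [[((1, 2), (3, 4), 5)], [((1, 7), (0, 1), 2), ((1, 3), (2, 9), 4)]]

def Spec_make_range (clusters : List (List ((Int × Int) × (Int × Int) × Int))) (out : List ((Int × Int × Int) × (Int × Int × Int) × Int)) : Prop := out = make_range_alt clusters
instance (clusters : List (List ((Int × Int) × (Int × Int) × Int))) (out : List ((Int × Int × Int) × (Int × Int × Int) × Int)) : Decidable (Spec_make_range clusters out) := by unfold Spec_make_range; infer_instance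

-- ===== CLAIM (what is proved, stated in full; the proofs are below) =====
def Claim_equal_make_range : Prop := ∀ (clusters : List (List ((Int × Int) × (Int × Int) × Int))), Dom_make_range clusters → Pre_make_range clusters → Spec_make_range clusters (make_range clusters)

-- ===== LEMMAS AND PROOFS =====

theorem lexLt_iff (p q : Int × Int) :
    pyLexLt p q = true ↔ (p.1 < q.1 ∨ (p.1 = q.1 ∧ p.2 < q.2)) := by
  simp [pyLexLt]

theorem lexLt_false_iff (p q : Int × Int) :
    pyLexLt p q = false ↔ ¬ (p.1 < q.1 ∨ (p.1 = q.1 ∧ p.2 < q.2)) := by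
  rw [← Bool.not_eq_true, lexLt_iff]

-- min2?'s step condition is exactly Python's lexicographic '<'
theorem minCond_eq (x m : Int × Int) :
    (decide (x.1 < m.1) || (!decide (m.1 < x.1) && decide (x.2 < m.2))) = pyLexLt x m := by
  simp only [pyLexLt]
  by_cases h1 : x.1 < m.1 <;> by_cases h2 : m.1 < x.1 <;> by_cases h3 : x.2 < m.2 <;>
    simp [h1, h2, h3] <;> omega

theorem min2_cons_cons (m x : Int × Int) (xs : List (Int × Int)) :
    PySem.List.min2? (m :: x :: xs) (fun p => p.1) (fun p => p.2) =
    PySem.List.min2? ((if pyLexLt x m then x else m) :: xs) (fun p => p.1) (fun p => p.2) := by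
  simp only [PySem.List.min2?, List.foldl_cons, minCond_eq]
  split <;> rfl

theorem max2_cons_cons (m x : Int × Int) (xs : List (Int × Int)) :
    PySem.List.max2? (m :: x :: xs) (fun p => p.1) (fun p => p.2) =
    PySem.List.max2? ((if pyLexLt m x then x else m) :: xs) (fun p => p.1) (fun p => p.2) := by
  simp only [PySem.List.max2?, List.foldl_cons, minCond_eq]
  split <;> rfl

theorem min2_eq_fold (xs : List (Int × Int)) (m : Int × Int) :
    PySem.List.min2? (m :: xs) (fun p => p.1) (fun p => p.2) =
    some (xs.foldl (fun m x => if pyLexLt x m then x else m) m) := by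
  induction xs generalizing m with
  | nil => rfl
  | cons x xs ih => rw [min2_cons_cons, ih, List.foldl_cons]

theorem max2_eq_fold (xs : List (Int × Int)) (m : Int × Int) :
    PySem.List.max2? (m :: xs) (fun p => p.1) (fun p => p.2) =
    some (xs.foldl (fun m x => if pyLexLt m x then x else m) m) := by
  induction xs generalizing m with
  | nil => rfl
  | cons x xs ih => rw [max2_cons_cons, ih, List.foldl_cons]

-- under the invariant lo ≤ hi, B's elif update equals the two independent updates
theorem bStep_apply (a : (Int × Int) × (Int × Int) × Int)
    (xlo xhi ylo yhi : Int × Int) (s : Int)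
    (hx : pyLexLt xhi xlo = false) (hy : pyLexLt yhi ylo = false) :
    make_range_bStep (xlo, xhi, ylo, yhi, s) a =
      ((if pyLexLt a.1 xlo then a.1 else xlo),
       (if pyLexLt xhi a.1 then a.1 else xhi),
       (if pyLexLt a.2.1 ylo then a.2.1 else ylo),
       (if pyLexLt yhi a.2.1 then a.2.1 else yhi),
       s + a.2.2) := by
  rw [lexLt_false_iff] at hx hy
  simp only [make_range_bStep]
  by_cases h1 : pyLexLt a.1 xlo = true
  · have h2 : pyLexLt xhi a.1 = false := by
      rw [lexLt_false_iff]; rw [lexLt_iff] at h1; omega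
    by_cases h3 : pyLexLt a.2.1 ylo = true
    · have h4 : pyLexLt yhi a.2.1 = false := by
        rw [lexLt_false_iff]; rw [lexLt_iff] at h3; omega
      simp [h1, h2, h3, h4]
    · simp only [h1, if_true, h3, if_false, Bool.not_eq_true] at *
      by_cases h4 : pyLexLt yhi a.2.1 = true <;> simp [h1, h2, h3, h4]
  · by_cases h3 : pyLexLt a.2.1 ylo = true
    · have h4 : pyLexLt yhi a.2.1 = false := by
        rw [lexLt_false_iff]; rw [lexLt_iff] at h3; omega
      by_cases h2 : pyLexLt xhi a.1 = true <;> simp [h1, h2, h3, h4]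
    · by_cases h2 : pyLexLt xhi a.1 = true <;>
        by_cases h4 : pyLexLt yhi a.2.1 = true <;> simp [h1, h2, h3, h4]

-- the invariant lo ≤ hi is preserved by one update
theorem inv_step (v lo hi : Int × Int) (h : pyLexLt hi lo = false) :
    pyLexLt (if pyLexLt hi v then v else hi) (if pyLexLt v lo then v else lo) = false := by
  rw [lexLt_false_iff] at h
  split_ifs with h1 h2 h2 <;> rw [lexLt_false_iff] <;>
    first
    | (rw [lexLt_iff] at h1 h2 <;> omega)
    | (rw [lexLt_iff] at h1; rw [lexLt_false_iff] at h2; omega)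
    | (rw [lexLt_false_iff] at h1; rw [lexLt_iff] at h2; omega)
    | (rw [lexLt_false_iff] at h1 h2; omega)
    | (rw [lexLt_iff] at h1; omega)
    | (rw [lexLt_false_iff] at h1; omega)

-- B's coupled single pass splits into the four running min/max folds plus the score fold
theorem bfold_split (t : List ((Int × Int) × (Int × Int) × Int))
    (xlo xhi ylo yhi : Int × Int) (s : Int)
    (hx : pyLexLt xhi xlo = false) (hy : pyLexLt yhi ylo = false) :
    t.foldl make_range_bStep (xlo, xhi, ylo, yhi, s) =
      (t.foldl (fun m a => if pyLexLt a.1 m then a.1 else m) xlo,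
       t.foldl (fun m a => if pyLexLt m a.1 then a.1 else m) xhi,
       t.foldl (fun m a => if pyLexLt a.2.1 m then a.2.1 else m) ylo,
       t.foldl (fun m a => if pyLexLt m a.2.1 then a.2.1 else m) yhi,
       t.foldl (fun s a => s + a.2.2) s) := by
  induction t generalizing xlo xhi ylo yhi s with
  | nil => rfl
  | cons a tl ih =>
    simp only [List.foldl_cons]
    rw [bStep_apply a xlo xhi ylo yhi s hx hy]
    exact ih _ _ _ _ _ (inv_step a.1 xlo xhi hx) (inv_step a.2.1 ylo yhi hy)

theorem lexLt_irrefl (p : Int × Int) : pyLexLt p p = false := by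
  simp [pyLexLt]

theorem cluster_eq (c : List ((Int × Int) × (Int × Int) × Int)) (hc : c ≠ []) :
    make_range_clusterA c = make_range_clusterB c := by
  match c with
  | [] => exact absurd rfl hc
  | first :: rest =>
    simp only [make_range_clusterA, make_range_clusterB, List.map_cons, List.foldl_cons]
    rw [min2_eq_fold, max2_eq_fold, min2_eq_fold, max2_eq_fold,
        bfold_split rest first.1 first.1 first.2.1 first.2.1 first.2.2
          (lexLt_irrefl _) (lexLt_irrefl _)]
    simp [List.foldl_map]

-- ===== VERDICT =====
theorem make_range_spec : Claim_equal_make_range := by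
  intro clusters _ hpre
  unfold Spec_make_range make_range make_range_alt
  have key : ∀ (cs : List (List ((Int × Int) × (Int × Int) × Int)))
      (acc : List ((Int × Int × Int) × (Int × Int × Int) × Int)),
      (∀ c ∈ cs, c ≠ []) →
      cs.foldl (fun ecl c => match make_range_clusterA c with
                 | some e => ecl ++ [e] | none => ecl) acc =
      cs.foldl (fun ecl c => match make_range_clusterB c with
                 | some e => ecl ++ [e] | none => ecl) acc := by
    intro cs
    induction cs with
    | nil => intro _ _; rfl
    | cons c tl ih =>
      intro acc h
      simp only [List.foldl_cons, cluster_eq c (h c (by simp))]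
      exact ih _ (fun x hx => h x (by simp [hx]))
  exact key clusters [] hpre
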